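-- pv_equiv track=rewrite | github.com/we-are-Zed/webtest-python | state/impl/tag_sequence_state.py | get_match_list
-- ===== SOURCE A (Python) =====
-- from typing import List, Tuple, Dict, Any
--
-- def get_match_list(s1: str, s2: str) -> List[str]:
--     list_matches = []
--     match = front_max_match(s1, s2)
--
--     if match:
--         front_source = s1[:s1.index(match)]
--         front_target = s2[:s2.index(match)]
--         front_queue = get_match_list(front_source, front_target)
--
--         end_source = s1[s1.index(match) + len(match):]
--         end_target = s2[s2.index(match) + len(match):]
--         end_queue = get_match_list(end_source, end_target)
--
--         list_matches.append(match)
--         list_matches.extend(front_queue)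
--         list_matches.extend(end_queue)
--
--     return list_matches
--
-- def front_max_match(s1: str, s2: str) -> str:
--     longest = 0
--     longest_substring = ""
--     for i in range(len(s1)):
--         for j in range(i + 1, len(s1) + 1):
--             substring = s1[i:j]
--             if substring in s2 and len(substring) > longest:
--                 longest = len(substring)
--                 longest_substring = substring
--
--     return longest_substring
-- ===== SOURCE B (Python) =====
-- def get_match_list(s1: str, s2: str):
--     match = _longest_common(s1, s2)
--     if not match:
--         return []
--     i, j = s1.find(match), s2.find(match)
--     k = len(match)
--     return [match] + get_match_list(s1[:i], s2[:j]) + get_match_list(s1[i + k:], s2[j + k:])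
--
-- def _longest_common(s1: str, s2: str) -> str:
--     # grow-only scan: the candidate length is only ever extended, never re-tried
--     best = ""
--     for i in range(len(s1)):
--         while len(best) < len(s1) - i and s1[i:i + len(best) + 1] in s2:
--             best = s1[i:i + len(best) + 1]
--     return best
-- ===== Notes on version B (the rewrite author's own statement) =====
-- stated objective: faster
-- what changed: The longest-common-substring search no longer enumerates all O(n^2) substrings of s1 per call: B keeps a single grow-only candidate and, for each start index, only tries to extend it by one character, so only O(n) containment tests are made per call instead of O(n^2).
import Mathlib
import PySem

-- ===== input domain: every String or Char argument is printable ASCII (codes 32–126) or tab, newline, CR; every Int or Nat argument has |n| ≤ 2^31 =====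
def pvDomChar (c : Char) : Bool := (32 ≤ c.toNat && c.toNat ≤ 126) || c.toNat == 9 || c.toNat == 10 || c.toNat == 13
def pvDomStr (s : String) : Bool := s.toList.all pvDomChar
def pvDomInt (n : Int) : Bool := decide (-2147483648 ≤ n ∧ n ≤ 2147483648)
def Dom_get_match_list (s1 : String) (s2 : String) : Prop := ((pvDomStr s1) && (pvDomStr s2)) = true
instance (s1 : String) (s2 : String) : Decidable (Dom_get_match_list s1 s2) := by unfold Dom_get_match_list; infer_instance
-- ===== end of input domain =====

-- B replaces A's full double loop over all substrings of s1 by a grow-only candidate that is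
-- only ever extended by one character (amortised O(n) containment tests per call vs O(n^2)).
-- Equivalence is on the return value; neither program mutates its arguments.

-- ===== PORT A =====
-- strings are handled on List Char (PySem.Chars); the String entry points convert.

-- front_max_match: the full double loop over all substrings s1[i:j]
def front_max_match (s1 s2 : List Char) : List Char :=
  ((PySem.List.pyRange 0 (s1.length : Int) 1).foldl (fun (st : Int × List Char) i =>
      (PySem.List.pyRange (i + 1) ((s1.length : Int) + 1) 1).foldl (fun (st : Int × List Char) j =>
        let substring := PySem.Chars.slice s1 (some i) (some j)
        if PySem.Chars.isIn substring s2 = true ∧ (substring.length : Int) > st.1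
        then ((substring.length : Int), substring) else st) st)
    ((0 : Int), ([] : List Char))).2

-- termination support (cited in decreasing_by and in the invariant proofs): any slice is an infix
theorem slice_infix_pv {α : Type} (xs : List α) (a? b? : Option Int) :
    PySem.List.slice xs a? b? <:+: xs := by
  unfold PySem.List.slice
  exact (List.take_prefix _ _).isInfix.trans (List.drop_suffix _ _).isInfix

-- termination support for the recursion of get_match_list (cited in decreasing_by):
-- a nonempty front_max_match result occurs in s1 and in s2
theorem front_max_match_infix (s1 s2 : List Char) (h : front_max_match s1 s2 ≠ []) :
    front_max_match s1 s2 <:+: s1 ∧ front_max_match s1 s2 <:+: s2 := by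
  unfold front_max_match at h ⊢
  refine List.foldlRecOn
    (motive := fun st : Int × List Char => st.2 ≠ [] → st.2 <:+: s1 ∧ st.2 <:+: s2)
    _ _ (fun hne => absurd rfl hne) ?_ h
  intro st hst i _
  refine List.foldlRecOn
    (motive := fun st : Int × List Char => st.2 ≠ [] → st.2 <:+: s1 ∧ st.2 <:+: s2)
    _ _ hst ?_
  intro st' hst' j _
  dsimp only
  split_ifs with hc
  · intro _
    refine ⟨?_, (PySem.Chars.isIn_iff_infix _ _).1 hc.1⟩
    rw [PySem.Chars.slice_eq_listSlice]
    show PySem.List.slice s1 (some i) (some j) <:+: s1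
    exact slice_infix_pv s1 _ _
  · exact hst'

-- both recursive calls are on a strictly shorter first string
theorem gml_rec_lt (s1 : List Char) (m : List Char) (hne : m ≠ []) (h1 : m <:+: s1) :
    (PySem.Chars.slice s1 none (some (PySem.Chars.find s1 m))).length < s1.length ∧
    (PySem.Chars.slice s1 (some (PySem.Chars.find s1 m + (m.length : Int))) none).length < s1.length := by
  have hm : 0 < m.length := List.length_pos_iff.2 hne
  have hf : 0 ≤ PySem.Chars.find s1 m := (PySem.Chars.find_nonneg_iff s1 m).2 h1
  have hsp := (PySem.Chars.find_spec hf).1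
  have hlen : (PySem.Chars.find s1 m).toNat + m.length ≤ s1.length := by
    have := hsp.length_le
    rw [List.length_drop] at this
    omega
  constructor
  · rw [PySem.Chars.slice_eq_listSlice, PySem.List.slice_to s1 hf]
    simp only [List.length_take]
    omega
  · have h0 : (0:Int) ≤ PySem.Chars.find s1 m + (m.length : Int) := by omega
    rw [PySem.Chars.slice_eq_listSlice, PySem.List.slice_from s1 h0]
    simp only [List.length_drop]
    omega

def gmlA (s1 s2 : List Char) : List String :=
  let mtch := front_max_match s1 s2
  if h : mtch ≠ [] then
    -- Python's s1.index(match): match occurs in s1 and s2 (front_max_match_infix), so index = find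
    let front_source := PySem.Chars.slice s1 none (some (PySem.Chars.find s1 mtch))
    let front_target := PySem.Chars.slice s2 none (some (PySem.Chars.find s2 mtch))
    let front_queue := gmlA front_source front_target
    let end_source := PySem.Chars.slice s1 (some (PySem.Chars.find s1 mtch + (mtch.length : Int))) none
    let end_target := PySem.Chars.slice s2 (some (PySem.Chars.find s2 mtch + (mtch.length : Int))) none
    let end_queue := gmlA end_source end_target
    [String.ofList mtch] ++ front_queue ++ end_queue
  else []
termination_by s1.length
decreasing_by
  · exact (gml_rec_lt s1 _ h (front_max_match_infix s1 s2 h).1).1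
  · exact (gml_rec_lt s1 _ h (front_max_match_infix s1 s2 h).1).2

def get_match_list (s1 : String) (s2 : String) : List String := gmlA s1.toList s2.toList

-- ===== PORT B =====

-- the while loop of _longest_common: extend the current best by one character at a time
def lc_extend (s1 s2 : List Char) (i : Nat) (best : List Char) : List Char :=
  if h : (best.length : Int) < (s1.length : Int) - (i : Int) ∧
      PySem.Chars.isIn (PySem.Chars.slice s1 (some (i : Int)) (some ((i : Int) + (best.length : Int) + 1))) s2 = true then
    lc_extend s1 s2 i (PySem.Chars.slice s1 (some (i : Int)) (some ((i : Int) + (best.length : Int) + 1)))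
  else best
termination_by s1.length - best.length
decreasing_by
  have hlen : (PySem.Chars.slice s1 (some (i : Int)) (some ((i : Int) + (best.length : Int) + 1))).length
      = best.length + 1 := by
    have : ((i : Int) + (best.length : Int) + 1) = ((i : Int) + ((best.length + 1 : Nat) : Int)) := by push_cast; ring
    rw [this]
    simp only [PySem.Chars.slice_eq_listSlice, PySem.List.slice_natCast_add, List.length_take,
      List.length_drop]
    omega
  omega

def longest_common (s1 s2 : List Char) : List Char :=
  (PySem.List.pyRange 0 (s1.length : Int) 1).foldl (fun best i => lc_extend s1 s2 i.toNat best) []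

-- the while loop preserves "nonempty ⇒ occurs in s1 and s2"
theorem lc_extend_pres (s1 s2 : List Char) (i : Nat) (best : List Char)
    (hb : best ≠ [] → best <:+: s1 ∧ best <:+: s2) :
    lc_extend s1 s2 i best ≠ [] → lc_extend s1 s2 i best <:+: s1 ∧ lc_extend s1 s2 i best <:+: s2 := by
  fun_induction lc_extend s1 s2 i best with
  | case1 best h ih =>
    refine ih ?_
    intro _
    refine ⟨?_, (PySem.Chars.isIn_iff_infix _ _).1 h.2⟩
    rw [PySem.Chars.slice_eq_listSlice]
    exact slice_infix_pv s1 _ _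
  | case2 best h => exact hb

-- termination support (cited in decreasing_by): a nonempty longest_common occurs in s1 and s2
theorem longest_common_infix (s1 s2 : List Char) (h : longest_common s1 s2 ≠ []) :
    longest_common s1 s2 <:+: s1 ∧ longest_common s1 s2 <:+: s2 := by
  unfold longest_common at h ⊢
  refine List.foldlRecOn
    (motive := fun best : List Char => best ≠ [] → best <:+: s1 ∧ best <:+: s2)
    _ _ (fun hne => absurd rfl hne) ?_ h
  intro best hb i _
  exact lc_extend_pres s1 s2 i.toNat best hb

def gmlB (s1 s2 : List Char) : List String :=
  let m := longest_common s1 s2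
  if h : m = [] then []
  else
    let i := PySem.Chars.find s1 m
    let j := PySem.Chars.find s2 m
    let k := (m.length : Int)
    [String.ofList m]
      ++ gmlB (PySem.Chars.slice s1 none (some i)) (PySem.Chars.slice s2 none (some j))
      ++ gmlB (PySem.Chars.slice s1 (some (i + k)) none) (PySem.Chars.slice s2 (some (j + k)) none)
termination_by s1.length
decreasing_by
  · exact (gml_rec_lt s1 _ h (longest_common_infix s1 s2 h).1).1
  · exact (gml_rec_lt s1 _ h (longest_common_infix s1 s2 h).1).2

def get_match_list_alt (s1 : String) (s2 : String) : List String := gmlB s1.toList s2.toList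

-- ===== PRECONDITION & SPEC =====
def Spec_get_match_list (s1 : String) (s2 : String) (out : List String) : Prop := out = get_match_list_alt s1 s2
instance (s1 : String) (s2 : String) (out : List String) : Decidable (Spec_get_match_list s1 s2 out) := by unfold Spec_get_match_list; infer_instance

-- ===== CLAIM (what is proved, stated in full; the proofs are below) =====
def Claim_equal_get_match_list : Prop := ∀ (s1 : String) (s2 : String), Dom_get_match_list s1 s2 → Spec_get_match_list s1 s2 (get_match_list s1 s2)

-- ===== LEMMAS AND PROOFS =====

-- the inner step of A's double loop, named for the proofs (definitionally the lambda in front_max_match)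
def stepA (s1 s2 : List Char) (i : Int) (st : Int × List Char) (j : Int) : Int × List Char :=
  let substring := PySem.Chars.slice s1 (some i) (some j)
  if PySem.Chars.isIn substring s2 = true ∧ (substring.length : Int) > st.1
  then ((substring.length : Int), substring) else st

theorem fmm_as_step (s1 s2 : List Char) :
    front_max_match s1 s2 = ((PySem.List.pyRange 0 (s1.length : Int) 1).foldl (fun st i =>
      (PySem.List.pyRange (i + 1) ((s1.length : Int) + 1) 1).foldl (stepA s1 s2 i) st)
      ((0 : Int), ([] : List Char))).2 := rfl

theorem foldl_fixed {α β : Type} (f : β → α → β) (st : β) :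
    ∀ l : List α, (∀ x ∈ l, f st x = st) → l.foldl f st = st := by
  intro l
  induction l with
  | nil => intro _; rfl
  | cons x xs ih =>
    intro h
    rw [List.foldl_cons, h x (List.mem_cons_self), ih (fun y hy => h y (List.mem_cons_of_mem x hy))]

theorem slice_len_eq (s1 : List Char) (iN : Nat) (j : Int) (hj : 0 ≤ j) :
    (PySem.Chars.slice s1 (some (iN : Int)) (some j)).length
      = min j.toNat s1.length - min iN s1.length := by
  rw [PySem.Chars.slice_eq_listSlice, PySem.List.length_slice,
    show j = ((j.toNat : Nat) : Int) from (Int.toNat_of_nonneg hj).symm,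
    PySem.List.clampIdx_natCast, PySem.List.clampIdx_natCast]
  omega

theorem stepA_noop (s1 s2 : List Char) (iN : Nat) (cur : List Char) (j : Int)
    (hj : (PySem.Chars.slice s1 (some (iN : Int)) (some j)).length ≤ cur.length) :
    stepA s1 s2 (iN : Int) (((cur.length : Nat) : Int), cur) j = (((cur.length : Nat) : Int), cur) := by
  unfold stepA
  dsimp only
  rw [if_neg]
  rintro ⟨-, hgt⟩
  simp only [gt_iff_lt] at hgt
  omega

-- the slice A tests at step j = i + len(best) + 1 is exactly best extended by one character
theorem slice_ext_eq (s1 : List Char) (iN L : Nat) :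
    PySem.Chars.slice s1 (some (iN : Int)) (some ((iN : Int) + (L : Int) + 1))
      = (s1.drop iN).take (L + 1) := by
  rw [show (iN : Int) + (L : Int) + 1 = ((iN : Nat) : Int) + (((L + 1 : Nat)) : Int) by push_cast; ring,
    PySem.Chars.slice_eq_listSlice, PySem.List.slice_natCast_add]

-- the while loop of B computes exactly what A's inner loop computes on the rest of its range
theorem key_core (s1 s2 : List Char) (iN : Nat) (cur : List Char) :
    (PySem.List.pyRange ((iN : Int) + (cur.length : Int) + 1) ((s1.length : Int) + 1) 1).foldl
        (stepA s1 s2 (iN : Int)) (((cur.length : Nat) : Int), cur)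
      = (((lc_extend s1 s2 iN cur).length : Int), lc_extend s1 s2 iN cur) := by
  fun_induction lc_extend s1 s2 iN cur with
  | case1 best h ih =>
    have hlen : (PySem.Chars.slice s1 (some (iN : Int)) (some ((iN : Int) + (best.length : Int) + 1))).length
        = best.length + 1 := by
      rw [slice_ext_eq, List.length_take, List.length_drop]
      omega
    rw [PySem.List.pyRange_one_cons (by omega), List.foldl_cons]
    have hstep : stepA s1 s2 (iN : Int) (((best.length : Nat) : Int), best) ((iN : Int) + (best.length : Int) + 1)
        = (((PySem.Chars.slice s1 (some (iN : Int)) (some ((iN : Int) + (best.length : Int) + 1))).length : Int),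
            PySem.Chars.slice s1 (some (iN : Int)) (some ((iN : Int) + (best.length : Int) + 1))) := by
      unfold stepA
      dsimp only
      rw [if_pos ⟨h.2, by rw [hlen]; push_cast; omega⟩]
    rw [hstep]
    have harg : (iN : Int) + (best.length : Int) + 1 + 1
        = (iN : Int) + ((PySem.Chars.slice s1 (some (iN : Int)) (some ((iN : Int) + (best.length : Int) + 1))).length : Int) + 1 := by
      rw [hlen]; push_cast; ring
    rw [← harg] at ih
    exact ih
  | case2 best h =>
    by_cases hbig : (best.length : Int) < (s1.length : Int) - (iN : Int)
    · have hno : PySem.Chars.isIn ((s1.drop iN).take (best.length + 1)) s2 = false := by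
        rw [← slice_ext_eq s1 iN best.length]
        cases hv : PySem.Chars.isIn (PySem.Chars.slice s1 (some (iN : Int)) (some ((iN : Int) + (best.length : Int) + 1))) s2
        · rfl
        · exact absurd ⟨hbig, hv⟩ h
      apply foldl_fixed
      intro j hj
      rw [PySem.List.mem_pyRange_one] at hj
      unfold stepA
      dsimp only
      rw [if_neg]
      rintro ⟨hin, -⟩
      rw [show j = ((iN : Nat) : Int) + (((j.toNat - iN : Nat)) : Int) by omega,
        PySem.Chars.slice_eq_listSlice, PySem.List.slice_natCast_add] at hin
      have hpref : (s1.drop iN).take (best.length + 1) <+: (s1.drop iN).take (j.toNat - iN) :=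
        List.take_prefix_take_left (by omega)
      have : PySem.Chars.isIn ((s1.drop iN).take (best.length + 1)) s2 = true :=
        (PySem.Chars.isIn_iff_infix _ _).2 (hpref.isInfix.trans ((PySem.Chars.isIn_iff_infix _ _).1 hin))
      rw [hno] at this
      exact Bool.false_ne_true this
    · rw [PySem.List.pyRange_one_eq_nil (by omega), List.foldl_nil]

-- A's inner loop from j = i+1: the first len(cur) steps cannot beat the current best
theorem key (s1 s2 : List Char) (iN : Nat) (cur : List Char) :
    (PySem.List.pyRange ((iN : Int) + 1) ((s1.length : Int) + 1) 1).foldl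
        (stepA s1 s2 (iN : Int)) (((cur.length : Nat) : Int), cur)
      = (((lc_extend s1 s2 iN cur).length : Int), lc_extend s1 s2 iN cur) := by
  by_cases hsplit : iN + cur.length ≤ s1.length
  · rw [PySem.List.pyRange_one_append ((iN : Int) + 1) ((iN : Int) + (cur.length : Int) + 1)
      ((s1.length : Int) + 1) (by omega) (by omega), List.foldl_append]
    have hfix := foldl_fixed (stepA s1 s2 (iN : Int)) (((cur.length : Nat) : Int), cur)
      (PySem.List.pyRange ((iN : Int) + 1) ((iN : Int) + (cur.length : Int) + 1) 1)
      (fun j hj => by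
        rw [PySem.List.mem_pyRange_one] at hj
        refine stepA_noop s1 s2 iN cur j ?_
        rw [slice_len_eq s1 iN j (by omega)]
        omega)
    rw [hfix]
    exact key_core s1 s2 iN cur
  · rw [lc_extend.eq_def, dif_neg (by rintro ⟨h1, -⟩; omega)]
    exact foldl_fixed (stepA s1 s2 (iN : Int)) (((cur.length : Nat) : Int), cur)
      (PySem.List.pyRange ((iN : Int) + 1) ((s1.length : Int) + 1) 1)
      (fun j hj => by
        rw [PySem.List.mem_pyRange_one] at hj
        refine stepA_noop s1 s2 iN cur j ?_
        rw [slice_len_eq s1 iN j (by omega)]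
        omega)

theorem foldl_pair_corr {α : Type} (fA : Int × List Char → α → Int × List Char)
    (fB : List Char → α → List Char) :
    ∀ (l : List α) (cur : List Char),
      (∀ (cur' : List Char), ∀ x ∈ l, fA (((cur'.length : Nat) : Int), cur') x = (((fB cur' x).length : Int), fB cur' x)) →
      l.foldl fA (((cur.length : Nat) : Int), cur) = (((l.foldl fB cur).length : Int), l.foldl fB cur) := by
  intro l
  induction l with
  | nil => intro cur _; rfl
  | cons x xs ih =>
    intro cur h
    rw [List.foldl_cons, List.foldl_cons, h cur x (List.mem_cons_self),
      ih (fB cur x) (fun c y hy => h c y (List.mem_cons_of_mem x hy))]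

theorem fmm_eq_lc (s1 s2 : List Char) : front_max_match s1 s2 = longest_common s1 s2 := by
  rw [fmm_as_step]
  unfold longest_common
  rw [show ((0 : Int), ([] : List Char)) = (((([] : List Char).length : Nat) : Int), ([] : List Char)) from rfl]
  rw [foldl_pair_corr _ _ _ ([] : List Char) ?_]
  intro cur x hx
  rw [PySem.List.mem_pyRange_one] at hx
  rw [show x = ((x.toNat : Nat) : Int) from (Int.toNat_of_nonneg hx.1).symm]
  exact key s1 s2 x.toNat cur

theorem gml_eq (s1 s2 : List Char) : gmlA s1 s2 = gmlB s1 s2 := by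
  suffices H : ∀ (N : Nat) (s1 s2 : List Char), s1.length ≤ N → gmlA s1 s2 = gmlB s1 s2 from
    H s1.length s1 s2 le_rfl
  intro N
  induction N using Nat.strong_induction_on with
  | _ N ih =>
    intro s1 s2 hle
    rw [gmlA.eq_def, gmlB.eq_def, fmm_eq_lc]
    by_cases hm : longest_common s1 s2 = []
    · simp [hm]
    · rw [dif_pos hm, dif_neg hm]
      dsimp only
      have hinf := longest_common_infix s1 s2 hm
      have hlt := gml_rec_lt s1 _ hm hinf.1
      congr 1
      · congr 1
        exact ih _ (by omega) _ _ le_rfl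
      · exact ih _ (by omega) _ _ le_rfl

-- ===== VERDICT (by name: the statement is the Claim_ definition above) =====
theorem get_match_list_spec : Claim_equal_get_match_list := by
  intro s1 s2 _
  unfold Spec_get_match_list get_match_list get_match_list_alt
  exact gml_eq _ _
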